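-- pv_equiv track=rewrite | github.com/cjcolman/advent_of_code | 2024/Connor/7/bridge_repair.py | is_line_valid
-- ===== SOURCE A (Python) =====
-- def is_line_valid(result, inputs):
--     if len(inputs) == 1:
--         return inputs[0] == result
--     if is_line_valid(result, [inputs[0] + inputs[1]] + inputs[2:]):
--         return True
--     if is_line_valid(result, [inputs[0] * inputs[1]] + inputs[2:]):
--         return True
--     return False
-- ===== SOURCE B (Python) =====
-- def is_line_valid(result, inputs):
--     # Backward search from the result: undo the last operator (subtract for '+',
--     # exact-divide for '*'), pruning branches that cannot reach the target.
--     def reach(target, k):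
--         # can target be produced left-to-right from inputs[0..k]?
--         if k == 0:
--             return inputs[0] == target
--         x = inputs[k]
--         if reach(target - x, k - 1):
--             return True
--         if x == 0:
--             return target == 0
--         return target % x == 0 and reach(target // x, k - 1)
--     return reach(result, len(inputs) - 1)
-- ===== Notes on version B (the rewrite author's own statement) =====
-- stated objective: faster
-- what changed: B searches backward from the target, undoing the last operator (subtract for '+', exact-divide for '*') and pruning multiplication branches where the divisor does not divide the target, instead of A's forward enumeration of all 2^(n-1) operator sequences.
-- outside the precondition, e.g. on is_line_valid(5, []): A raises IndexError, B raises IndexError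
import Mathlib
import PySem

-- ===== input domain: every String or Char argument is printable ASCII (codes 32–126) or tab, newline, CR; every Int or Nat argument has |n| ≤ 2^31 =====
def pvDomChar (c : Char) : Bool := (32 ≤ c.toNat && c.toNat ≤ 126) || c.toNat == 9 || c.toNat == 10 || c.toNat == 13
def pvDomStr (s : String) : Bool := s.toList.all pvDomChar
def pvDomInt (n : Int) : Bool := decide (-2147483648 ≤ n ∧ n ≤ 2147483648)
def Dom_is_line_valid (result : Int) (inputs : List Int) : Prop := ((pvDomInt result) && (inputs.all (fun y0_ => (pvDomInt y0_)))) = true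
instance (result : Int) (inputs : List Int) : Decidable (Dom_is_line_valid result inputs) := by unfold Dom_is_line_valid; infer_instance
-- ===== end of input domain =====

-- B replaces A's forward enumeration of all operator sequences by a backward search
-- from the target with divisibility/subtraction pruning (objective: faster, constant-factor).

-- ===== PORT A =====
def is_line_valid (result : Int) (inputs : List Int) : Bool :=
  match inputs with
  | [] => false          -- Python raises IndexError here; excluded by Pre_
  | [a] => a == result
  | a :: b :: rest =>
    if is_line_valid result ((a + b) :: rest) then true
    else if is_line_valid result ((a * b) :: rest) then true
    else false
termination_by inputs.length
decreasing_by all_goals simp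

-- ===== PORT B =====
-- B's helper `reach(target, k)` walks the inputs from the last index down; the port
-- recurses over the REVERSED input list, which is the same traversal.
def reachRev (target : Int) : List Int → Bool
  | [] => false
  | [a] => a == target
  | x :: rest =>
    if reachRev (target - x) rest then true
    else if x == 0 then decide (target = 0)
    else decide (PySem.Int.mod target x = 0) && reachRev (PySem.Int.floordiv target x) rest

def is_line_valid_alt (result : Int) (inputs : List Int) : Bool :=
  reachRev result inputs.reverse

-- ===== PRECONDITION & SPEC =====
-- Python A raises IndexError on the empty list (inputs[0]); those inputs are excluded.
def Pre_is_line_valid (result : Int) (inputs : List Int) : Prop := inputs ≠ []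
instance (result : Int) (inputs : List Int) : Decidable (Pre_is_line_valid result inputs) := by unfold Pre_is_line_valid; infer_instance
def pvWitness_is_line_valid : Int × List Int := (6, [2, 3])

def Spec_is_line_valid (result : Int) (inputs : List Int) (out : Bool) : Prop := out = is_line_valid_alt result inputs
instance (result : Int) (inputs : List Int) (out : Bool) : Decidable (Spec_is_line_valid result inputs out) := by unfold Spec_is_line_valid; infer_instance

-- ===== CLAIM (what is proved, stated in full; the proofs are below) =====
def Claim_equal_is_line_valid : Prop := ∀ (result : Int) (inputs : List Int), Dom_is_line_valid result inputs → Pre_is_line_valid result inputs → Spec_is_line_valid result inputs (is_line_valid result inputs)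

-- ===== LEMMAS AND PROOFS =====

-- `Can a xs v`: starting from accumulator a, applying + or * with the elements of xs
-- left to right can produce v.  Both programs decide `Can a ys result` for inputs = a :: ys.
inductive Can : Int → List Int → Int → Prop
  | nil (a : Int) : Can a [] a
  | add {a x v : Int} {xs : List Int} : Can (a + x) xs v → Can a (x :: xs) v
  | mul {a x v : Int} {xs : List Int} : Can (a * x) xs v → Can a (x :: xs) v

theorem Can_nil_iff (a v : Int) : Can a [] v ↔ a = v := by
  constructor
  · intro h; cases h; rfl
  · intro h; subst h; exact Can.nil a

theorem Can_cons_iff (a x v : Int) (xs : List Int) :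
    Can a (x :: xs) v ↔ Can (a + x) xs v ∨ Can (a * x) xs v := by
  constructor
  · intro h; cases h with
    | add h => exact Or.inl h
    | mul h => exact Or.inr h
  · rintro (h | h)
    · exact Can.add h
    · exact Can.mul h

theorem Can_exists (ys : List Int) (a : Int) : ∃ v, Can a ys v := by
  induction ys generalizing a with
  | nil => exact ⟨a, Can.nil a⟩
  | cons x xs ih =>
    obtain ⟨v, hv⟩ := ih (a + x)
    exact ⟨v, Can.add hv⟩

theorem Can_snoc (ys : List Int) (a x t : Int) :
    Can a (ys ++ [x]) t ↔ ∃ v, Can a ys v ∧ (v + x = t ∨ v * x = t) := by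
  induction ys generalizing a with
  | nil =>
    constructor
    · intro h
      rw [List.nil_append, Can_cons_iff] at h
      rcases h with h | h <;> rw [Can_nil_iff] at h <;> exact ⟨a, Can.nil a, by tauto⟩
    · rintro ⟨v, hv, h⟩
      rw [Can_nil_iff] at hv; subst hv
      rw [List.nil_append, Can_cons_iff]
      rcases h with h | h
      · exact Or.inl ((Can_nil_iff _ _).mpr h)
      · exact Or.inr ((Can_nil_iff _ _).mpr h)
  | cons y ys ih =>
    rw [List.cons_append, Can_cons_iff, ih, ih]
    constructor
    · rintro (⟨v, hv, h⟩ | ⟨v, hv, h⟩)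
      · exact ⟨v, Can.add hv, h⟩
      · exact ⟨v, Can.mul hv, h⟩
    · rintro ⟨v, hv, h⟩
      rcases (Can_cons_iff a y v ys).mp hv with hv | hv
      · exact Or.inl ⟨v, hv, h⟩
      · exact Or.inr ⟨v, hv, h⟩

-- A decides Can.
theorem A_iff (ys : List Int) (a r : Int) :
    is_line_valid r (a :: ys) = true ↔ Can a ys r := by
  induction ys generalizing a with
  | nil => simp [is_line_valid, Can_nil_iff]
  | cons x xs ih =>
    rw [Can_cons_iff, ← ih (a + x), ← ih (a * x)]
    simp [is_line_valid]

-- the multiplication step undone exactly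
theorem mul_eq_iff_dvd (v x t : Int) (hx : x ≠ 0) :
    v * x = t ↔ (PySem.Int.mod t x = 0 ∧ v = PySem.Int.floordiv t x) := by
  constructor
  · intro h
    have hdvd : x ∣ t := ⟨v, by linarith [mul_comm v x]⟩
    have hm : PySem.Int.mod t x = 0 := (PySem.Int.mod_eq_zero_iff_dvd t x).mpr hdvd
    have hfd := PySem.Int.floordiv_mul_add_mod t x
    rw [hm, add_zero] at hfd
    refine ⟨hm, ?_⟩
    have : v * x = PySem.Int.floordiv t x * x := by rw [h, hfd]
    exact mul_right_cancel₀ hx this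
  · rintro ⟨hm, hv⟩
    have hfd := PySem.Int.floordiv_mul_add_mod t x
    rw [hm, add_zero] at hfd
    rw [hv, hfd]

-- unfolding B's recursive step on a list with at least two elements
theorem reachRev_cons (t x y : Int) (zs : List Int) :
    reachRev t (x :: y :: zs) =
      (reachRev (t - x) (y :: zs) ||
        (if x = 0 then decide (t = 0)
         else decide (PySem.Int.mod t x = 0) && reachRev (PySem.Int.floordiv t x) (y :: zs))) := by
  show (if reachRev (t - x) (y :: zs) then true
        else if x == 0 then decide (t = 0)
        else decide (PySem.Int.mod t x = 0) && reachRev (PySem.Int.floordiv t x) (y :: zs)) = _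
  by_cases h : reachRev (t - x) (y :: zs) <;> by_cases hx : x = 0 <;> simp [h, hx]

-- B decides Can.
theorem B_iff (ys : List Int) (a t : Int) :
    reachRev t (ys.reverse ++ [a]) = true ↔ Can a ys t := by
  induction ys using List.reverseRecOn generalizing t with
  | nil =>
    simp only [List.reverse_nil, List.nil_append, reachRev, beq_iff_eq, Can_nil_iff]
  | append_singleton ys x ih =>
    have hrw : ((ys ++ [x]).reverse ++ [a]) = x :: (ys.reverse ++ [a]) := by simp
    rw [hrw, Can_snoc]
    obtain ⟨y, zs, hyz⟩ : ∃ y zs, ys.reverse ++ [a] = y :: zs := by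
      cases h : ys.reverse ++ [a] with
      | nil => simp at h
      | cons y zs => exact ⟨y, zs, rfl⟩
    rw [hyz, reachRev_cons, ← hyz]
    by_cases hx : x = 0
    · subst hx
      rw [if_pos rfl, Bool.or_eq_true, ih, decide_eq_true_eq]
      constructor
      · rintro (h | h)
        · exact ⟨t - 0, h, Or.inl (by ring)⟩
        · obtain ⟨v, hv⟩ := Can_exists ys a
          exact ⟨v, hv, Or.inr (by omega)⟩
      · rintro ⟨v, hv, h | h⟩
        · left
          have hveq : t - 0 = v := by omega
          rw [hveq]; exact hv
        · right; omega
    · rw [if_neg hx, Bool.or_eq_true, ih, Bool.and_eq_true, decide_eq_true_eq, ih]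
      constructor
      · rintro (h | ⟨hm, hr⟩)
        · exact ⟨t - x, h, Or.inl (by ring)⟩
        · exact ⟨_, hr, Or.inr ((mul_eq_iff_dvd _ x t hx).mpr ⟨hm, rfl⟩)⟩
      · rintro ⟨v, hv, h | h⟩
        · left
          have hveq : t - x = v := by omega
          rw [hveq]; exact hv
        · rcases (mul_eq_iff_dvd v x t hx).mp h with ⟨hm, hv'⟩
          exact Or.inr ⟨hm, hv' ▸ hv⟩

-- ===== VERDICT (by name: the statement is the Claim_ definition above) =====
theorem is_line_valid_spec : Claim_equal_is_line_valid := by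
  intro result inputs _hdom hpre
  unfold Spec_is_line_valid is_line_valid_alt
  cases inputs with
  | nil => exact absurd rfl hpre
  | cons a ys =>
    have hA := A_iff ys a result
    have hB := B_iff ys a result
    have hrw : (a :: ys).reverse = ys.reverse ++ [a] := by simp
    rw [hrw]
    rw [Bool.eq_iff_iff, hA, hB]
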